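-- pv_equiv track=rewrite | github.com/stanrunge/advent-of-code-2023 | 1/part2.py | getSpelledOutNumbers
-- ===== SOURCE A (Python) =====
-- dict = {
--     "one": 1,
--     "two": 2,
--     "three": 3,
--     "four": 4,
--     "five" : 5,
--     "six": 6,
--     "seven": 7,
--     "eight": 8,
--     "nine": 9
-- }
--
-- def getSpelledOutNumbers(line):
--     numbers = []
--     for key in dict:
--         index = 0
--         while True:
--             index = line.find(key, index)
--             if index == -1:
--                 break
--             numbers.append((dict[key], index))
--             index += 1
--     return numbers
-- ===== SOURCE B (Python) =====
-- WORDS = {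
--     "one": 1,
--     "two": 2,
--     "three": 3,
--     "four": 4,
--     "five": 5,
--     "six": 6,
--     "seven": 7,
--     "eight": 8,
--     "nine": 9,
-- }
--
-- def getSpelledOutNumbers(line):
--     hits = {word: [] for word in WORDS}
--     for i in range(len(line)):
--         for word in WORDS:
--             if line.startswith(word, i):
--                 hits[word].append(i)
--     return [(value, i) for word, value in WORDS.items() for i in hits[word]]
-- ===== Notes on version B (the rewrite author's own statement) =====
-- stated objective: alternative
-- what changed: Instead of re-scanning the string once per word with repeated str.find, B makes one pass over the positions, bucketing each position into a dict word->indices via startswith, and then flattens the buckets in word order.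
import Mathlib
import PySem

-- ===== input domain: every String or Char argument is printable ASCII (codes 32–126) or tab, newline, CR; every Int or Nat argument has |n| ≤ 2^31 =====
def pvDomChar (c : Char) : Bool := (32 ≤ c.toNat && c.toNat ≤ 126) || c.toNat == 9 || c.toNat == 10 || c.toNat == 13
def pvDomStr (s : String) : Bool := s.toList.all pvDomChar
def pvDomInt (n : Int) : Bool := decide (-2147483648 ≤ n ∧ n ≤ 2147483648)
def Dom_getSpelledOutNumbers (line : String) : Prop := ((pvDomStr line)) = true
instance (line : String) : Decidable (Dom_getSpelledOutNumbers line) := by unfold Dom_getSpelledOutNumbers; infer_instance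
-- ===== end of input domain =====

-- B replaces A's per-word repeated str.find scans by one pass over the positions that
-- buckets each position into a dict word -> indices (tested with startswith), then flattens
-- the buckets in word order (objective: alternative decomposition, same exact output).

-- the module-level dict, in insertion order
def pvWords : List (String × Int) :=
  [("one", 1), ("two", 2), ("three", 3), ("four", 4), ("five", 5),
   ("six", 6), ("seven", 7), ("eight", 8), ("nine", 9)]

-- ===== PORT A =====
-- A's inner 'while True' loop; fuel only makes it total (line.length + 1 iterations always suffice)
def pvFindLoop (line key : String) (v : Int) : Nat → Int → List (Int × Int) → List (Int × Int)
  | 0, _, numbers => numbers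
  | fuel + 1, index, numbers =>
    let index := PySem.Str.findFrom line key index
    if index = -1 then numbers
    else pvFindLoop line key v fuel (index + 1) (numbers ++ [(v, index)])

def getSpelledOutNumbers (line : String) : List (Int × Int) :=
  pvWords.foldl (fun numbers kv => pvFindLoop line kv.1 kv.2 (line.toList.length + 1) 0 numbers) []

-- ===== PORT B =====
-- hand port of line.startswith(w, i): for the nonnegative i used here it is the slice test
def pvStartswith (line w : String) (i : Int) : Bool :=
  decide (PySem.Str.slice line (some i) (some (i + PySem.Str.len w)) = w)

def getSpelledOutNumbers_alt (line : String) : List (Int × Int) :=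
  let hits : PySem.Dict String (List Int) :=
    pvWords.foldl (fun d wv => d.insert wv.1 []) PySem.Dict.empty
  let hits := (PySem.List.pyRange 0 (PySem.Str.len line) 1).foldl
    (fun d i => pvWords.foldl
      (fun d wv => if pvStartswith line wv.1 i then d.modify wv.1 [] (· ++ [i]) else d) d)
    hits
  pvWords.flatMap (fun wv => (hits.getD wv.1 []).map (fun i => (wv.2, i)))

-- ===== PRECONDITION & SPEC =====
def Spec_getSpelledOutNumbers (line : String) (out : List (Int × Int)) : Prop := out = getSpelledOutNumbers_alt line
instance (line : String) (out : List (Int × Int)) : Decidable (Spec_getSpelledOutNumbers line out) := by unfold Spec_getSpelledOutNumbers; infer_instance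

-- ===== CLAIM (what is proved, stated in full; the proofs are below) =====
def Claim_equal_getSpelledOutNumbers : Prop := ∀ (line : String), Dom_getSpelledOutNumbers line → Spec_getSpelledOutNumbers line (getSpelledOutNumbers line)

-- ===== LEMMAS AND PROOFS =====

-- the ascending list of occurrence positions ≥ k of w in s, as Int indices
def pvOcc (s w : List Char) (k : Nat) : List Int :=
  (PySem.List.pyRange (k : Int) (s.length : Int) 1).filter (fun i => decide (w <+: s.drop i.toNat))

lemma pv_prefix_drop_infix {s w : List Char} {k i : Nat} (hk : k ≤ i)
    (h : w <+: s.drop i) : w <:+: s.drop k := by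
  have : s.drop i = (s.drop k).drop (i - k) := by
    rw [List.drop_drop]; congr 1; omega
  exact (this ▸ h).isInfix.trans (List.drop_suffix _ _).isInfix

-- A's find loop emits exactly the occurrence positions ≥ k, in ascending order
lemma pvFindLoop_eq (line key : String) (hw : key.toList ≠ []) (v : Int) :
    ∀ (fuel k : Nat) (acc : List (Int × Int)),
      k ≤ line.toList.length → line.toList.length + 1 ≤ fuel + k →
      pvFindLoop line key v fuel (k : Int) acc
        = acc ++ (pvOcc line.toList key.toList k).map (fun i => (v, i)) := by
  intro fuel
  induction fuel with
  | zero => intro k acc hk hf; omega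
  | succ fuel ih =>
    intro k acc hk hf
    have hbridge : PySem.Str.findFrom line key (k : Int)
        = PySem.Chars.findFrom line.toList key.toList (k : Int) := by
      rw [PySem.Str.findFrom_eq]
    by_cases h : PySem.Chars.findFrom line.toList key.toList (k : Int) = -1
    · -- no further occurrence: the loop stops and the remaining occurrence list is empty
      have hno : ¬ key.toList <:+: line.toList.drop k :=
        (PySem.Chars.findFrom_natCast_eq_neg_one_iff line.toList key.toList k hk).mp h
      have hfilter : pvOcc line.toList key.toList k = [] := by
        rw [pvOcc, List.filter_eq_nil_iff]
        intro i hi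
        have hmem := (PySem.List.mem_pyRange_one (x := i)).mp hi
        simp only [decide_eq_true_eq]
        intro hpre
        exact hno (pv_prefix_drop_infix (i := i.toNat) (by omega) hpre)
      simp [pvFindLoop, h, hfilter]
    · obtain ⟨h1, h2, h3⟩ :=
        PySem.Chars.findFrom_natCast_spec line.toList key.toList k hk h
      have hj0 : 0 ≤ PySem.Chars.findFrom line.toList key.toList (k : Int) := by
        have : (0 : Int) ≤ (k : Int) := by exact_mod_cast Nat.cast_nonneg k
        omega
      set jn := (PySem.Chars.findFrom line.toList key.toList (k : Int)).toNat with hjndef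
      have hjn : PySem.Chars.findFrom line.toList key.toList (k : Int) = ((jn : Nat) : Int) := by
        omega
      have hjlt : jn < line.toList.length := by
        by_contra hge
        have hnil : line.toList.drop jn = [] := List.drop_eq_nil_of_le (by omega)
        rw [hnil] at h2
        exact hw (List.prefix_nil.mp h2)
      have hkj : k ≤ jn := by omega
      -- split the remaining range at the found position jn
      have hsplit : pvOcc line.toList key.toList k
          = ((jn : Nat) : Int) :: pvOcc line.toList key.toList (jn + 1) := by
        rw [pvOcc, pvOcc,
            PySem.List.pyRange_one_append (k : Int) (jn : Int) (line.toList.length : Int)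
              (by omega) (by exact_mod_cast Nat.le_of_lt hjlt),
            PySem.List.pyRange_one_append (jn : Int) ((jn : Int) + 1) (line.toList.length : Int)
              (by omega) (by exact_mod_cast hjlt),
            PySem.List.pyRange_one_singleton]
        have hfirst : (PySem.List.pyRange (k : Int) (jn : Int) 1).filter
            (fun i => decide (key.toList <+: line.toList.drop i.toNat)) = [] := by
          rw [List.filter_eq_nil_iff]
          intro i hi
          have hmem := (PySem.List.mem_pyRange_one (x := i)).mp hi
          simp only [decide_eq_true_eq]
          exact h3 i.toNat (by omega) (by omega)
        simp [hfirst, h2]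
      rw [pvFindLoop]
      simp only [hbridge, if_neg h]
      rw [hjn, show ((jn : Nat) : Int) + 1 = ((jn + 1 : Nat) : Int) by push_cast; ring]
      rw [ih (jn + 1) (acc ++ [(v, ((jn : Nat) : Int))]) (by omega) (by omega)]
      rw [hsplit]
      simp

-- B's slice test agrees with the prefix test on in-range positions
lemma pv_slice_test (line w : String) (i : Int) (h0 : 0 ≤ i) :
    pvStartswith line w i = true ↔ w.toList <+: line.toList.drop i.toNat := by
  rw [pvStartswith, decide_eq_true_eq]
  have hi : i = ((i.toNat : Nat) : Int) := by omega
  have hslice : (PySem.Str.slice line (some i) (some (i + PySem.Str.len w))).toList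
      = (line.toList.drop i.toNat).take w.toList.length := by
    rw [PySem.Str.toList_slice, hi]
    rw [show PySem.Str.len w = ((w.toList.length : Nat) : Int) by simp [PySem.Str.len]]
    simp only [PySem.Chars.slice_eq_listSlice]
    exact PySem.List.slice_natCast_add line.toList i.toNat w.toList.length
  constructor
  · intro he
    rw [List.prefix_iff_eq_take, ← hslice, he]
  · intro hp
    have : (PySem.Str.slice line (some i) (some (i + PySem.Str.len w))).toList = w.toList := by
      rw [hslice]; exact (List.prefix_iff_eq_take.mp hp).symm
    exact String.toList_inj.mp this

-- the initial {word: [] for word in WORDS} dict looks up to [] everywhere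
lemma pv_init_getD (wl : List (String × Int)) :
    ∀ (d : PySem.Dict String (List Int)) (w : String), (∀ k, d.getD k [] = []) →
      (wl.foldl (fun d wv => d.insert wv.1 []) d).getD w [] = [] := by
  induction wl with
  | nil => intro d w h; exact h w
  | cons x t ih =>
    intro d w h
    rw [List.foldl_cons]
    exact ih _ w (fun k => by rw [PySem.Dict.getD_insert]; split <;> simp [h k])

-- one position step of B's loop: the bucket of w gains i iff w is a listed word starting at i
lemma pv_inner_getD (line : String) (i : Int) :
    ∀ (wl : List (String × Int)) (d : PySem.Dict String (List Int)) (w : String),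
      (wl.map (·.1)).Nodup →
      (wl.foldl (fun d wv =>
          if pvStartswith line wv.1 i then d.modify wv.1 [] (· ++ [i]) else d) d).getD w []
        = d.getD w [] ++ (if w ∈ wl.map (·.1) ∧ pvStartswith line w i = true then [i] else []) := by
  intro wl
  induction wl with
  | nil => intro d w _; simp
  | cons x t ih =>
    intro d w hnd
    rw [List.map_cons, List.nodup_cons] at hnd
    rw [List.foldl_cons, ih _ w hnd.2]
    by_cases hwx : w = x.1
    · subst hwx
      by_cases hs : pvStartswith line x.1 i = true
      · simp [hs, hnd.1, PySem.Dict.getD_modify_self]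
      · simp [hs, hnd.1]
    · have hd : (if pvStartswith line x.1 i then d.modify x.1 [] (· ++ [i]) else d).getD w []
          = d.getD w [] := by
        split
        · rw [PySem.Dict.getD_modify]; simp [hwx]
        · rfl
      rw [hd]
      simp only [List.map_cons, List.mem_cons, eq_false hwx, false_or]

-- the whole position scan: w's bucket collects exactly the positions where w starts
lemma pv_outer_getD (line : String) (w : String) (hw : w ∈ pvWords.map (·.1)) :
    ∀ (l : List Int) (d : PySem.Dict String (List Int)),
      (l.foldl (fun d i => pvWords.foldl
          (fun d wv => if pvStartswith line wv.1 i then d.modify wv.1 [] (· ++ [i]) else d) d)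
        d).getD w []
        = d.getD w [] ++ l.filter (fun i => pvStartswith line w i) := by
  intro l
  induction l with
  | nil => intro d; simp
  | cons x t ih =>
    intro d
    rw [List.foldl_cons, ih, pv_inner_getD line x pvWords d w (by decide)]
    by_cases hs : pvStartswith line w x = true
    · simp [hs, hw, List.append_assoc]
    · simp [hs]

-- pointwise-equal block functions give equal flatMaps
lemma pv_flatMap_congr {α β : Type} (f g : α → List β) :
    ∀ (l : List α), (∀ x ∈ l, f x = g x) → l.flatMap f = l.flatMap g := by
  intro l
  induction l with
  | nil => intro _; rfl
  | cons x t ih =>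
    intro h
    rw [List.flatMap_cons, List.flatMap_cons, h x (by simp), ih (fun y hy => h y (by simp [hy]))]

-- B's bucket for a listed word, as an occurrence list
lemma pv_alt_bucket (line : String) (w : String) (hw : w ∈ pvWords.map (·.1)) :
    ((PySem.List.pyRange 0 (PySem.Str.len line) 1).foldl
      (fun d i => pvWords.foldl
        (fun d wv => if pvStartswith line wv.1 i then d.modify wv.1 [] (· ++ [i]) else d) d)
      (pvWords.foldl (fun d wv => d.insert wv.1 []) PySem.Dict.empty)).getD w []
    = pvOcc line.toList w.toList 0 := by
  rw [pv_outer_getD line w hw,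
      pv_init_getD pvWords PySem.Dict.empty w (fun k => by simp [PySem.Dict.getD_empty])]
  rw [List.nil_append, pvOcc]
  have hrange : PySem.List.pyRange 0 (PySem.Str.len line) 1
      = PySem.List.pyRange ((0 : Nat) : Int) ((line.toList.length : Nat) : Int) 1 := by
    rw [show PySem.Str.len line = ((line.toList.length : Nat) : Int) by simp [PySem.Str.len]]
    norm_num
  rw [hrange]
  apply List.filter_congr
  intro i hi
  have hmem := PySem.List.mem_pyRange_one.mp hi
  rw [show (pvStartswith line w i) = decide (pvStartswith line w i = true) by simp]
  exact decide_eq_decide.mpr (pv_slice_test line w i (by omega))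

-- a fold whose every step appends a block is a flatMap
lemma pv_foldl_blocks {α β : Type} (f : List β → α → List β) (g : α → List β) :
    ∀ (l : List α) (acc : List β), (∀ x ∈ l, ∀ a, f a x = a ++ g x) →
      l.foldl f acc = acc ++ l.flatMap g := by
  intro l
  induction l with
  | nil => intro acc _; simp
  | cons x t ih =>
    intro acc h
    rw [List.foldl_cons, h x (by simp), ih _ (fun y hy a => h y (by simp [hy]) a)]
    simp

-- ===== VERDICT (by name: the statement is the Claim_ definition above) =====
theorem getSpelledOutNumbers_spec : Claim_equal_getSpelledOutNumbers := by
  intro line _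
  show getSpelledOutNumbers line = getSpelledOutNumbers_alt line
  have halt : getSpelledOutNumbers_alt line
      = pvWords.flatMap (fun wv => (pvOcc line.toList wv.1.toList 0).map (fun i => (wv.2, i))) := by
    rw [getSpelledOutNumbers_alt]
    apply pv_flatMap_congr
    intro wv hwv
    rw [pv_alt_bucket line wv.1 (List.mem_map_of_mem hwv)]
  rw [halt, getSpelledOutNumbers]
  have hstep : ∀ kv ∈ pvWords, ∀ acc : List (Int × Int),
      pvFindLoop line kv.1 kv.2 (line.toList.length + 1) 0 acc
        = acc ++ (pvOcc line.toList kv.1.toList 0).map (fun i => (kv.2, i)) := by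
    intro kv hkv acc
    have hw : kv.1.toList ≠ [] := by fin_cases hkv <;> simp
    have := pvFindLoop_eq line kv.1 hw kv.2 (line.toList.length + 1) 0 acc
      (Nat.zero_le _) (by omega)
    simpa using this
  rw [pv_foldl_blocks
    (fun numbers kv => pvFindLoop line kv.1 kv.2 (line.toList.length + 1) 0 numbers)
    (fun wv => (pvOcc line.toList wv.1.toList 0).map (fun i => (wv.2, i)))
    pvWords [] hstep]
  simp
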